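-- pv_equiv track=rewrite | github.com/equinor/ert | src/ert/validation/rangestring.py | mask_to_rangestring
-- ===== SOURCE A (Python) =====
-- from typing import Collection, List, Optional, Union
--
-- def mask_to_rangestring(mask: Collection[Union[bool, int]]) -> str:
--     """Convert a mask (ordered collection of booleans or int) into a rangestring.
--
--     >>> mask_to_rangestring([0, 1, 0, 1, 1, 1])
--     '1, 3-5'
--     >>> mask_to_rangestring([True, False, True, True])
--     '0, 2-3'
--     >>> mask_to_rangestring([])
--     ''
--     >>> mask_to_rangestring([False, False, False])
--     ''
--
--     The length of the collection is not encoded in the resulting string and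
--     must be stored elsewhere.
--     """
--     ranges: List[str] = []
--
--     def store_range(begin: int, end: int) -> None:
--         if end - begin == 1:
--             ranges.append(f"{begin}")
--         else:
--             ranges.append(f"{begin}-{end-1}")
--
--     start: Optional[int] = None
--     for i, is_active in enumerate(mask):
--         if is_active:
--             if start is None:  # begin tracking a range
--                 start = i
--             assert start is not None
--         else:
--             if start is not None:  # store the range and stop tracking
--                 store_range(start, i)
--                 start = None
--             assert start is None
--     if start is not None:  # complete the last range if any
--         store_range(start, len(mask))
--     return ", ".join(ranges)
-- ===== SOURCE B (Python) =====
-- def mask_to_rangestring(mask):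
--     """Boundary detection: find run starts and run ends independently by
--     comparing each element with its neighbour, then zip starts with ends."""
--     m = [bool(v) for v in mask]
--     starts = [i for i, (prev, cur) in enumerate(zip([False] + m, m)) if cur and not prev]
--     ends = [i for i, (cur, nxt) in enumerate(zip(m, m[1:] + [False])) if cur and not nxt]
--     return ", ".join(
--         str(a) if a == b else f"{a}-{b}" for a, b in zip(starts, ends)
--     )
-- ===== Notes on version B (the rewrite author's own statement) =====
-- stated objective: alternative
-- what changed: Replaced A's incremental start/None state machine with boundary detection: run starts (true with false predecessor) and run ends (true with false successor) are computed independently by zipping the mask with its shifted copies, then starts are zipped with ends; there is no run-tracking state at all.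
import Mathlib
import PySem

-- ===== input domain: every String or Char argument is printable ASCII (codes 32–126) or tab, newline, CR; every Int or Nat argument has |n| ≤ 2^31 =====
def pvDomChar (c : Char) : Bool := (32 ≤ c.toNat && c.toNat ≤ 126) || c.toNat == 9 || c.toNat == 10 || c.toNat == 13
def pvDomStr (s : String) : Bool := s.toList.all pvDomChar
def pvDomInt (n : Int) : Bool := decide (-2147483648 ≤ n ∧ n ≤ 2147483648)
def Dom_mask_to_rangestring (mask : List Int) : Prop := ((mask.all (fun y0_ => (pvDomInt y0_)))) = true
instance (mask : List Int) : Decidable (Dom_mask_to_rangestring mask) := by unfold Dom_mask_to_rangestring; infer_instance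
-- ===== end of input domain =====

-- B replaces A's incremental start/None state machine by boundary detection: run starts and
-- run ends are found independently by neighbour comparison and zipped (alternative, same O(n)).

-- ===== PORT A =====
-- store_range(begin, end)
def pvStoreRange (b e : Int) : String :=
  if e - b = 1 then PySem.Int.toStr b
  else PySem.Int.toStr b ++ "-" ++ PySem.Int.toStr (e - 1)

-- loop body: state = (ranges, start), p = (i, is_active)
def pvStepA (st : List String × Option Int) (p : Int × Int) : List String × Option Int :=
  if p.2 ≠ 0 then
    match st.2 with
    | none => (st.1, some p.1)   -- begin tracking a range
    | some _ => st
  else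
    match st.2 with
    | some s => (st.1 ++ [pvStoreRange s p.1], none)  -- store the range and stop tracking
    | none => st

def mask_to_rangestring (mask : List Int) : String :=
  let st := List.foldl pvStepA ([], none) (PySem.List.enumerate mask 0)
  let ranges := match st.2 with
    | some s => st.1 ++ [pvStoreRange s (mask.length : Int)]  -- complete the last range if any
    | none => st.1
  PySem.Str.join ", " ranges

-- ===== PORT B =====
def mask_to_rangestring_alt (mask : List Int) : String :=
  let m := mask.map (fun v => v != 0)                          -- m = [bool(v) for v in mask]
  -- starts = [i for i, (prev, cur) in enumerate(zip([False] + m, m)) if cur and not prev]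
  let starts := ((PySem.List.enumerate ((false :: m).zip m) 0).filter
      (fun p => p.2.2 && !p.2.1)).map (·.1)
  -- ends = [i for i, (cur, nxt) in enumerate(zip(m, m[1:] + [False])) if cur and not nxt]
  let ends := ((PySem.List.enumerate (m.zip (m.drop 1 ++ [false])) 0).filter
      (fun p => p.2.1 && !p.2.2)).map (·.1)
  PySem.Str.join ", " ((starts.zip ends).map (fun p =>
    if p.1 = p.2 then PySem.Int.toStr p.1
    else PySem.Int.toStr p.1 ++ "-" ++ PySem.Int.toStr p.2))

-- ===== PRECONDITION & SPEC =====
def Spec_mask_to_rangestring (mask : List Int) (out : String) : Prop := out = mask_to_rangestring_alt mask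
instance (mask : List Int) (out : String) : Decidable (Spec_mask_to_rangestring mask out) := by unfold Spec_mask_to_rangestring; infer_instance

-- ===== CLAIM (what is proved, stated in full; the proofs are below) =====
def Claim_equal_mask_to_rangestring : Prop := ∀ (mask : List Int), Dom_mask_to_rangestring mask → Spec_mask_to_rangestring mask (mask_to_rangestring mask)

-- ===== LEMMAS AND PROOFS =====

-- formatting of one (lo, hi) run
def pvFmt (r : Int × Int) : String :=
  if r.1 = r.2 then PySem.Int.toStr r.1
  else PySem.Int.toStr r.1 ++ "-" ++ PySem.Int.toStr r.2

-- A's final "complete the last range" step, as a function of the loop's end state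
def pvPost (st : List String × Option Int) (e : Int) : List String :=
  match st.2 with
  | some s => st.1 ++ [pvStoreRange s e]
  | none => st.1

-- run starts of a boolean list, given the truthiness of the previous element
def pvStartsF (prev : Bool) (i : Int) : List Bool → List Int
  | [] => []
  | b :: xs => (if b && !prev then [i] else []) ++ pvStartsF b (i+1) xs

-- run ends, lookahead form (an index is an end iff it is true and the next is false)
def pvEndsF (i : Int) : List Bool → List Int
  | [] => []
  | b :: xs => (if b && !(xs.headD false) then [i] else []) ++ pvEndsF (i+1) xs

-- run ends, lookbehind form (aligned with A's state machine)
def pvEndsG (prev : Bool) (i : Int) : List Bool → List Int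
  | [] => if prev then [i-1] else []
  | b :: xs => (if prev && !b then [i-1] else []) ++ pvEndsG b (i+1) xs

lemma pv_store_eq (s e : Int) : pvStoreRange s e = pvFmt (s, e - 1) := by
  unfold pvStoreRange pvFmt
  split_ifs with h1 h2 h2 <;> simp_all <;> omega

lemma pv_endsG_eq : ∀ (m : List Bool) (prev : Bool) (i : Int),
    pvEndsG prev i m = (if prev && !(m.headD false) then [i-1] else []) ++ pvEndsF i m := by
  intro m
  induction m with
  | nil => intro prev i; simp [pvEndsG, pvEndsF]
  | cons b t ih =>
      intro prev i
      simp only [pvEndsG, pvEndsF, List.headD_cons, ih b (i+1)]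
      cases prev
      all_goals cases b
      all_goals simp

lemma pv_starts_eq : ∀ (m : List Bool) (prev : Bool) (i : Int),
    ((PySem.List.enumerate ((prev :: m).zip m) i).filter
        (fun p => p.2.2 && !p.2.1)).map (·.1) = pvStartsF prev i m := by
  intro m
  induction m with
  | nil => intro prev i; simp [PySem.List.enumerate_nil, pvStartsF]
  | cons b t ih =>
      intro prev i
      have hz : (prev :: b :: t).zip (b :: t) = (prev, b) :: ((b :: t).zip t) := rfl
      rw [hz, PySem.List.enumerate_cons]
      simp only [List.filter_cons, pvStartsF]
      cases prev <;> cases b <;> simp [ih]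

lemma pv_zip_next (b : Bool) (t : List Bool) :
    (b :: t).zip (t ++ [false]) = (b, t.headD false) :: (t.zip (t.drop 1 ++ [false])) := by
  cases t <;> rfl

lemma pv_ends_eq : ∀ (m : List Bool) (i : Int),
    ((PySem.List.enumerate (m.zip (m.drop 1 ++ [false])) i).filter
        (fun p => p.2.1 && !p.2.2)).map (·.1) = pvEndsF i m := by
  intro m
  induction m with
  | nil => intro i; simp [PySem.List.enumerate_nil, pvEndsF]
  | cons b t ih =>
      intro i
      rw [show (b :: t).drop 1 = t from rfl, pv_zip_next, PySem.List.enumerate_cons]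
      simp only [List.filter_cons, pvEndsF]
      cases hb : b <;> cases hh : t.headD false <;> simp [-List.drop_one, ih]

set_option maxRecDepth 4000 in
lemma pv_main : ∀ (xs : List Int) (i : Int) (R : List String) (s? : Option Int),
    pvPost (List.foldl pvStepA (R, s?) (PySem.List.enumerate xs i)) (i + xs.length) =
      R ++ ((match s? with
        | none => (pvStartsF false i (xs.map (fun v => v != 0))).zip
                    (pvEndsG false i (xs.map (fun v => v != 0)))
        | some s => (s :: pvStartsF true i (xs.map (fun v => v != 0))).zip
                    (pvEndsG true i (xs.map (fun v => v != 0)))).map pvFmt) := by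
  intro xs
  induction xs with
  | nil =>
      intro i R s?
      cases s? with
      | none => simp [PySem.List.enumerate_nil, pvPost, pvStartsF, pvEndsG]
      | some s =>
          simp [PySem.List.enumerate_nil, pvPost, pvStartsF, pvEndsG, pv_store_eq]
  | cons x t ih =>
      intro i R s?
      rw [PySem.List.enumerate_cons]
      have hlen : i + ((x :: t).length : Int) = (i + 1) + (t.length : Int) := by
        simp; omega
      by_cases hx : x = 0
      · cases s? with
        | none =>
            have h1 : List.foldl pvStepA (R, none) ((i, x) :: PySem.List.enumerate t (i+1))
                = List.foldl pvStepA (R, none) (PySem.List.enumerate t (i+1)) := by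
              simp [List.foldl_cons, pvStepA, hx]
            rw [h1, hlen, ih (i+1) R none]
            simp [hx, pvStartsF, pvEndsG]
        | some s =>
            have h1 : List.foldl pvStepA (R, some s) ((i, x) :: PySem.List.enumerate t (i+1))
                = List.foldl pvStepA (R ++ [pvFmt (s, i-1)], none) (PySem.List.enumerate t (i+1)) := by
              simp [List.foldl_cons, pvStepA, hx, pv_store_eq]
            rw [h1, hlen, ih (i+1) (R ++ [pvFmt (s, i-1)]) none]
            simp [hx, pvStartsF, pvEndsG]
      · cases s? with
        | none =>
            have h1 : List.foldl pvStepA (R, none) ((i, x) :: PySem.List.enumerate t (i+1))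
                = List.foldl pvStepA (R, some i) (PySem.List.enumerate t (i+1)) := by
              simp [List.foldl_cons, pvStepA, hx]
            rw [h1, hlen, ih (i+1) R (some i)]
            have hxb : (x != 0) = true := by simp [hx]
            simp [hxb, pvStartsF, pvEndsG]
        | some s =>
            have h1 : List.foldl pvStepA (R, some s) ((i, x) :: PySem.List.enumerate t (i+1))
                = List.foldl pvStepA (R, some s) (PySem.List.enumerate t (i+1)) := by
              simp [List.foldl_cons, pvStepA, hx]
            rw [h1, hlen, ih (i+1) R (some s)]
            have hxb : (x != 0) = true := by simp [hx]
            simp [hxb, pvStartsF, pvEndsG]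

-- ===== VERDICT (by name: the statement is the Claim_ definition above) =====
theorem mask_to_rangestring_spec : Claim_equal_mask_to_rangestring := by
  unfold Claim_equal_mask_to_rangestring
  intro mask _
  show mask_to_rangestring mask = mask_to_rangestring_alt mask
  have h := pv_main mask 0 [] none
  simp only [List.nil_append] at h
  rw [show (0 : Int) + (mask.length : Int) = (mask.length : Int) by omega] at h
  have hends : pvEndsG false 0 (mask.map (fun v => v != 0))
      = pvEndsF 0 (mask.map (fun v => v != 0)) := by
    rw [pv_endsG_eq]; simp
  calc mask_to_rangestring mask
      = PySem.Str.join ", " (pvPost (List.foldl pvStepA ([], none)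
          (PySem.List.enumerate mask 0)) (mask.length : Int)) := rfl
    _ = PySem.Str.join ", " (((pvStartsF false 0 (mask.map (fun v => v != 0))).zip
          (pvEndsG false 0 (mask.map (fun v => v != 0)))).map pvFmt) := by rw [h]
    _ = mask_to_rangestring_alt mask := by
          rw [hends, ← pv_ends_eq _ 0, ← pv_starts_eq _ false 0]
          rfl
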